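-- pv_equiv track=rewrite | github.com/BenjaminMummery/pre-commit-hooks | strict_tdd_hook/strict_tdd.py | _parse_file_list
-- ===== SOURCE A (Python) =====
-- from typing import List, Tuple
--
-- def _parse_file_list(
--     filenames: List[str],
-- ) -> Tuple[List[str], List[str], List[str]]:
--     """
--     Parse the list of files into lists of source files, test files, and other
--
--     Args:
--         filenames (List[str]): The list of changed files.
--
--     Returns:
--         source files, test files, other files: Lists of the filenames corresponding to
--             each category.
--     """
--     source_files: List[str] = []
--     test_files: List[str] = []
--     etc_files: List[str] = []
--
--     for file in filenames:
--         if file.startswith("src"):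
--             source_files.append(file)
--         elif file.startswith("test"):
--             test_files.append(file)
--         else:
--             etc_files.append(file)
--
--     return source_files, test_files, etc_files
-- ===== SOURCE B (Python) =====
-- from typing import Callable, List, Tuple
--
--
-- def _partition(pred: Callable[[str], bool], items: List[str]) -> Tuple[List[str], List[str]]:
--     """Generic binary split: (items satisfying pred, the rest), order preserved."""
--     yes: List[str] = []
--     no: List[str] = []
--     for item in items:
--         (yes if pred(item) else no).append(item)
--     return yes, no
--
--
-- def _parse_file_list(
--     filenames: List[str],
-- ) -> Tuple[List[str], List[str], List[str]]:
--     """Split filenames into (source, test, other) by two staged binary partitions: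
--     first peel off the 'src' files, then split the remainder on 'test'."""
--     source_files, rest = _partition(lambda f: f.startswith("src"), filenames)
--     test_files, etc_files = _partition(lambda f: f.startswith("test"), rest)
--     return source_files, test_files, etc_files
-- ===== Notes on version B (the rewrite author's own statement) =====
-- stated objective: alternative
-- what changed: Replaces the single three-way if/elif/else loop by two staged binary partitions with a generic _partition helper: first split off 'src' files, then split the remainder on 'test' (correct because no string starts with both prefixes).
import Mathlib
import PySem

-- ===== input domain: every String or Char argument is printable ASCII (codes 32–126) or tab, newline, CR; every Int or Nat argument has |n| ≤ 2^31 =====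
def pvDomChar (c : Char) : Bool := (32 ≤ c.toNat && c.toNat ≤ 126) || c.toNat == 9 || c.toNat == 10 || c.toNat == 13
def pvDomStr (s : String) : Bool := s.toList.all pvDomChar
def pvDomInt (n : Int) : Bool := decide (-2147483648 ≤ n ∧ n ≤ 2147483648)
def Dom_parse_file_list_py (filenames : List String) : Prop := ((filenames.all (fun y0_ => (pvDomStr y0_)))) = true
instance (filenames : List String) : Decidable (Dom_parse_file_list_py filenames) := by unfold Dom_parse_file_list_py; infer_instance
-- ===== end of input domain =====

-- B replaces A's single three-way branching loop by two staged binary partitions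
-- via a generic partition helper (objective: alternative decomposition, same cost).

-- ===== PORT A =====
-- Port of A: single pass over filenames, branching into one of three accumulators.
def parse_file_list_py (filenames : List String) : List String × List String × List String :=
  filenames.foldl
    (fun (acc : List String × List String × List String) file =>
      if PySem.Str.startswith file "src" then
        (acc.1 ++ [file], acc.2.1, acc.2.2)
      else if PySem.Str.startswith file "test" then
        (acc.1, acc.2.1 ++ [file], acc.2.2)
      else
        (acc.1, acc.2.1, acc.2.2 ++ [file]))
    ([], [], [])

-- ===== PORT B =====
-- Port of B's generic helper: binary split by a predicate, order preserved.
def pvPartition (pred : String → Bool) (items : List String) : List String × List String :=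
  items.foldl
    (fun (acc : List String × List String) item =>
      if pred item then (acc.1 ++ [item], acc.2) else (acc.1, acc.2 ++ [item]))
    ([], [])

-- Port of B: two staged binary partitions.
def parse_file_list_py_alt (filenames : List String) : List String × List String × List String :=
  let p1 := pvPartition (fun f => PySem.Str.startswith f "src") filenames
  let p2 := pvPartition (fun f => PySem.Str.startswith f "test") p1.2
  (p1.1, p2.1, p2.2)

-- ===== PRECONDITION & SPEC =====
def Spec_parse_file_list_py (filenames : List String) (out : List String × List String × List String) : Prop := out = parse_file_list_py_alt filenames
instance (filenames : List String) (out : List String × List String × List String) : Decidable (Spec_parse_file_list_py filenames out) := by unfold Spec_parse_file_list_py; infer_instance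

-- ===== CLAIM (what is proved, stated in full; the proofs are below) =====
def Claim_equal_parse_file_list_py : Prop := ∀ (filenames : List String), Dom_parse_file_list_py filenames → Spec_parse_file_list_py filenames (parse_file_list_py filenames)

-- ===== LEMMAS AND PROOFS =====

-- a string cannot start with both "src" and "test" (first characters differ)
theorem pv_not_src_and_test (x : String)
    (hs : PySem.Str.startswith x "src" = true) :
    ¬ PySem.Str.startswith x "test" = true := by
  intro ht
  simp only [PySem.Str.startswith_eq, PySem.Chars.startswith_iff] at hs ht
  obtain ⟨u, hu⟩ := hs
  obtain ⟨v, hv⟩ := ht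
  rw [← hu] at hv
  simp at hv

-- the partition fold computes the two filters
theorem pvPartition_eq (pred : String → Bool) (items : List String) :
    pvPartition pred items = (items.filter pred, items.filter (fun x => !pred x)) := by
  unfold pvPartition
  suffices h : ∀ a b : List String,
      items.foldl
        (fun (acc : List String × List String) item =>
          if pred item then (acc.1 ++ [item], acc.2) else (acc.1, acc.2 ++ [item]))
        (a, b)
      = (a ++ items.filter pred, b ++ items.filter (fun x => !pred x)) by
    simpa using h [] []
  induction items with
  | nil => simp
  | cons x xs ih =>
    intro a b
    simp only [List.foldl_cons, List.filter_cons]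
    by_cases hx : pred x = true
    · rw [if_pos hx, ih]; simp [hx]
    · rw [if_neg hx, ih]; simp [Bool.not_eq_true] at hx; simp [hx]

-- A's three-way fold computes three filters
theorem parse_file_list_py_foldl (filenames : List String)
    (a b c : List String) :
    filenames.foldl
      (fun (acc : List String × List String × List String) file =>
        if PySem.Str.startswith file "src" then
          (acc.1 ++ [file], acc.2.1, acc.2.2)
        else if PySem.Str.startswith file "test" then
          (acc.1, acc.2.1 ++ [file], acc.2.2)
        else
          (acc.1, acc.2.1, acc.2.2 ++ [file]))
      (a, b, c)
    = (a ++ filenames.filter (fun f => PySem.Str.startswith f "src"),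
       b ++ filenames.filter (fun f => PySem.Str.startswith f "test"),
       c ++ filenames.filter (fun f => !(PySem.Str.startswith f "src") && !(PySem.Str.startswith f "test"))) := by
  induction filenames generalizing a b c with
  | nil => simp
  | cons x xs ih =>
    simp only [List.foldl_cons, List.filter_cons]
    by_cases hs : PySem.Str.startswith x "src" = true
    · have ht : ¬ PySem.Str.startswith x "test" = true :=
        pv_not_src_and_test x hs
      rw [if_pos hs, ih]
      simp [Bool.not_eq_true] at hs ht
      simp [hs, ht]
    · rw [if_neg hs]
      by_cases ht : PySem.Str.startswith x "test" = true
      · rw [if_pos ht, ih]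
        simp [Bool.not_eq_true] at hs ht
        simp [hs, ht]
      · rw [if_neg ht, ih]
        simp [Bool.not_eq_true] at hs ht
        simp [hs, ht]

-- filtering "test" inside the non-"src" remainder is the same as filtering "test" directly
theorem pv_filter_test_rest (filenames : List String) :
    (filenames.filter (fun f => !(PySem.Str.startswith f "src"))).filter
        (fun f => PySem.Str.startswith f "test")
      = filenames.filter (fun f => PySem.Str.startswith f "test") := by
  induction filenames with
  | nil => rfl
  | cons x xs ih =>
    by_cases ht : PySem.Str.startswith x "test" = true
    · have hs : ¬ PySem.Str.startswith x "src" = true := by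
        intro hs; exact pv_not_src_and_test x hs ht
      simp [List.filter_cons, Bool.not_eq_true] at *
      simp [hs, ht, ih]
    · by_cases hs : PySem.Str.startswith x "src" = true
      · simp [List.filter_cons, Bool.not_eq_true] at *
        simp [hs, ht, ih]
      · simp [List.filter_cons, Bool.not_eq_true] at *
        simp [hs, ht, ih]

-- the two staged remainders compose to the conjunction filter
theorem pv_filter_etc_rest (filenames : List String) :
    (filenames.filter (fun f => !(PySem.Str.startswith f "src"))).filter
        (fun f => !(PySem.Str.startswith f "test"))
      = filenames.filter
          (fun f => !(PySem.Str.startswith f "src") && !(PySem.Str.startswith f "test")) := by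
  rw [List.filter_filter]
  simp [Bool.and_comm]

-- ===== VERDICT (by name: the statement is the Claim_ definition above) =====
theorem parse_file_list_py_spec : Claim_equal_parse_file_list_py := by
  intro filenames _
  unfold Spec_parse_file_list_py parse_file_list_py parse_file_list_py_alt
  rw [parse_file_list_py_foldl filenames [] [] []]
  simp only [pvPartition_eq, List.nil_append]
  rw [pv_filter_test_rest, pv_filter_etc_rest]
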